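-- pv_equiv track=rewrite | github.com/shuxin/tlsspy | tlsspy/calc/elliptic.py | _gdb
-- ===== SOURCE A (Python) =====
-- def _gdb(n):
--     '''
--     Calculate the second greatest base-2 divisor.
--     '''
--     i = 1
--     if n <= 0:
--         return 0
--
--     else:
--         while not n % i:
--             i <<= 1
--
--         return i >> 2
-- ===== SOURCE B (Python) =====
-- def _gdb(n):
--     '''
--     Calculate the second greatest base-2 divisor.
--     '''
--     if n <= 0:
--         return 0
--     return (n & -n) >> 1
-- ===== Notes on version B (the rewrite author's own statement) =====
-- stated objective: idiomatic
-- what changed: Replaced the doubling trial-division loop with the closed-form bit trick (n & -n) >> 1, which isolates the lowest set bit and halves it; the n <= 0 guard is kept.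
import Mathlib
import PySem

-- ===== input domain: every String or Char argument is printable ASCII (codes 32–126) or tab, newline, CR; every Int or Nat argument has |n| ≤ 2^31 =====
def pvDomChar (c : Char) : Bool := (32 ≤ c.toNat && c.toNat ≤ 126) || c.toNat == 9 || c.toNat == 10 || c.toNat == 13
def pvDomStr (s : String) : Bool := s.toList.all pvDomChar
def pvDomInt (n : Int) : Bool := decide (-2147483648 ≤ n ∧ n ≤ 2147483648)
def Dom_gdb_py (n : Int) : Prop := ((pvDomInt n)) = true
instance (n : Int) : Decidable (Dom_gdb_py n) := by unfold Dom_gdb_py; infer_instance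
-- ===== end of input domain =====

-- B replaces A's doubling trial-division loop by the closed-form bit trick (n & -n) >> 1 (same guard for nonpositive input), a single bit expression instead of a loop.


-- ===== PORT A =====
-- 'while not n % i: i <<= 1' ported as fuel recursion; within Dom (n ≤ 2^31) the
-- loop takes at most 33 steps for n > 0, so fuel 64 is never exhausted.
def gdbLoop (fuel : Nat) (n i : Int) : Int :=
  match fuel with
  | 0 => Int.shiftRight i 2
  | f + 1 => if n % i = 0 then gdbLoop f n (Int.shiftLeft i 1) else Int.shiftRight i 2

def gdb_py (n : Int) : Int :=
  if n ≤ 0 then 0 else gdbLoop 64 n 1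

-- ===== PORT B =====
def gdb_py_alt (n : Int) : Int :=
  if n ≤ 0 then 0 else Int.shiftRight (Int.land n (-n)) 1

-- ===== PRECONDITION & SPEC =====
def Spec_gdb_py (n : Int) (out : Int) : Prop := out = gdb_py_alt n
instance (n : Int) (out : Int) : Decidable (Spec_gdb_py n out) := by unfold Spec_gdb_py; infer_instance

-- ===== CLAIM (what is proved, stated in full; the proofs are below) =====
def Claim_equal_gdb_py : Prop := ∀ (n : Int), Dom_gdb_py n → Spec_gdb_py n (gdb_py n)

-- ===== LEMMAS AND PROOFS =====

-- Bit 0 of 2u+1 is set, of 2u it is not; higher bits agree.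
theorem testBit_two_mul_add_one_succ (u k : ℕ) :
    (2 * u + 1).testBit (k + 1) = (2 * u).testBit (k + 1) := by
  rw [Nat.testBit_succ, Nat.testBit_succ]
  congr 1
  omega

-- The lowest set bit of m = 2^t * (odd) is 2^t: ldiff m (m-1) = 2^t.
theorem ldiff_pred_eq_pow (t u : ℕ) :
    Nat.ldiff (2 ^ t * (2 * u + 1)) (2 ^ t * (2 * u + 1) - 1) = 2 ^ t := by
  have hp : 0 < 2 ^ t := Nat.two_pow_pos t
  have hsplit : 2 ^ t * (2 * u + 1) - 1 = 2 ^ t * (2 * u) + (2 ^ t - 1) := by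
    have : 2 ^ t * (2 * u + 1) = 2 ^ t * (2 * u) + 2 ^ t := by ring
    omega
  apply Nat.eq_of_testBit_eq
  intro j
  rw [Nat.testBit_ldiff, hsplit,
    Nat.testBit_two_pow_mul_add (2 * u) (by omega) j,
    Nat.testBit_two_pow_mul, Nat.testBit_two_pow]
  rcases lt_trichotomy j t with h | h | h
  · simp [h, Nat.not_le.mpr h, Nat.testBit_two_pow_sub_one, Nat.ne_of_gt h]
  · subst h
    simp [Nat.testBit_zero, Nat.mul_mod_right]
  · have hj : ¬ j < t := by omega
    have hge : j ≥ t := by omega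
    obtain ⟨k, hk⟩ : ∃ k, j - t = k + 1 := ⟨j - t - 1, by omega⟩
    simp [hj, hge, hk, testBit_two_mul_add_one_succ, Nat.ne_of_lt h]

-- For n = (m : Int) with m > 0, Python's n & -n equals ldiff m (m-1).
theorem land_neg_eq (m : ℕ) (hm : 0 < m) :
    Int.land (m : Int) (-(m : Int)) = (Nat.ldiff m (m - 1) : Int) := by
  obtain ⟨m', rfl⟩ : ∃ m', m = m' + 1 := ⟨m - 1, by omega⟩
  have : -((m' + 1 : ℕ) : Int) = Int.negSucc m' := rfl
  rw [this]
  simp [Int.land]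

-- Loop characterization: starting from i = 2^j with j ≤ t+1, where 2^t exactly
-- divides n, the loop returns (2^(t+1)) >> 2, given enough fuel.
theorem gdbLoop_eq (f : ℕ) : ∀ (j t : ℕ) (n : Int), 0 < n →
    ((2 : Int) ^ t) ∣ n → ¬ ((2 : Int) ^ (t + 1)) ∣ n → j ≤ t + 1 → t + 2 - j ≤ f →
    gdbLoop f n ((2 : Int) ^ j) = Int.shiftRight ((2 : Int) ^ (t + 1)) 2 := by
  induction f with
  | zero => intro j t n _ _ _ hj hf; omega
  | succ f ih =>
    intro j t n hn hdvd hnd hj hf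
    by_cases hjt : j = t + 1
    · subst hjt
      have hne : n % (2 : Int) ^ (t + 1) ≠ 0 := by
        intro h
        exact hnd (EuclideanDomain.mod_eq_zero.mp h)
      simp [gdbLoop, hne]
    · have hj' : j ≤ t := by omega
      have hdj : ((2 : Int) ^ j) ∣ n := dvd_trans (pow_dvd_pow 2 hj') hdvd
      have hz : n % (2 : Int) ^ j = 0 := EuclideanDomain.mod_eq_zero.mpr hdj
      have hshift : Int.shiftLeft ((2 : Int) ^ j) 1 = (2 : Int) ^ (j + 1) := by
        have hc : ((2 : Int) ^ j) = ((2 ^ j : ℕ) : Int) := by push_cast; ring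
        rw [hc]
        show ((((2 ^ j : ℕ) <<< 1 : ℕ)) : Int) = (2 : Int) ^ (j + 1)
        push_cast [Nat.shiftLeft_eq]
        ring
      simp only [gdbLoop, hz, hshift]
      exact ih (j + 1) t n hn hdvd hnd (by omega) (by omega)

-- (2^(t+1)) >> 2 = (2^t) >> 1 (both are 2^(t-1), and 0 for t = 0).
theorem shift_pow_eq (t : ℕ) :
    Int.shiftRight ((2 : Int) ^ (t + 1)) 2 = Int.shiftRight ((2 : Int) ^ t) 1 := by
  have h1 : ((2 : Int) ^ (t + 1)) = ((2 ^ (t + 1) : ℕ) : Int) := by push_cast; ring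
  have h2 : ((2 : Int) ^ t) = ((2 ^ t : ℕ) : Int) := by push_cast; ring
  rw [h1, h2]
  show (((2 ^ (t + 1) : ℕ) >>> 2 : ℕ) : Int) = (((2 ^ t : ℕ) >>> 1 : ℕ) : Int)
  congr 1
  rw [Nat.shiftRight_eq_div_pow, Nat.shiftRight_eq_div_pow]
  rcases t with _ | t'
  · norm_num
  · have h4 : (2:ℕ) ^ 2 = 4 := by norm_num
    have h1' : (2:ℕ) ^ (t' + 1 + 1) = 2 ^ t' * 4 := by ring
    have h2' : (2:ℕ) ^ (t' + 1) = 2 ^ t' * 2 := by ring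
    rw [h4, h1', h2', Nat.mul_div_cancel _ (by norm_num), pow_one,
      Nat.mul_div_cancel _ (by norm_num)]

-- ===== VERDICT (by name: the statement is the Claim_ definition above) =====
theorem gdb_py_spec : Claim_equal_gdb_py := by
  intro n hdom
  unfold Spec_gdb_py gdb_py gdb_py_alt
  by_cases hle : n ≤ 0
  · simp [hle]
  · simp only [if_neg hle]
    have hn : 0 < n := by omega
    set m : ℕ := n.natAbs with hm
    have hmpos : 0 < m := by simpa [hm] using Int.natAbs_pos.mpr (by omega : n ≠ 0)
    have hcast : ((m : ℕ) : Int) = n := by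
      simpa [hm] using Int.natAbs_of_nonneg (le_of_lt hn)
    obtain ⟨t, m', hodd, hfact⟩ := Nat.exists_eq_pow_mul_and_not_dvd (Nat.pos_iff_ne_zero.mp hmpos) 2 (by norm_num)
    obtain ⟨u, hu⟩ : ∃ u, m' = 2 * u + 1 := by
      rcases Nat.even_or_odd m' with he | ho
      · exact absurd he.two_dvd hodd
      · obtain ⟨u, hu⟩ := ho; exact ⟨u, hu⟩
    -- divisibility facts over Int
    have hdvdN : (2 : ℕ) ^ t ∣ m := ⟨m', hfact⟩
    have hndN : ¬ (2 : ℕ) ^ (t + 1) ∣ m := by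
      rintro ⟨c, hc⟩
      apply hodd
      have h2 : 2 ^ t * m' = 2 ^ t * (2 * c) := by
        rw [← hfact, hc]; ring
      have := Nat.eq_of_mul_eq_mul_left (Nat.two_pow_pos t) h2
      exact ⟨c, this⟩
    have hdvdI : ((2 : Int) ^ t) ∣ n := by
      rw [← hcast]
      exact_mod_cast Int.natCast_dvd_natCast.mpr hdvdN
    have hndI : ¬ ((2 : Int) ^ (t + 1)) ∣ n := by
      rw [← hcast]
      intro h
      exact hndN (by exact_mod_cast Int.natCast_dvd_natCast.mp (by exact_mod_cast h))
    -- bound on t from Dom: 2^t ≤ 2^31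
    have hmle : m ≤ 2 ^ 31 := by
      have : n ≤ 2147483648 := by
        have := hdom
        unfold Dom_gdb_py pvDomInt at this
        simp at this
        omega
      omega
    have ht : t ≤ 31 := by
      by_contra hgt
      have h1 : 2 ^ 32 ≤ 2 ^ t := Nat.pow_le_pow_right (by norm_num) (by omega)
      have h2 : 2 ^ t ≤ m := Nat.le_of_dvd hmpos hdvdN
      have : (2:ℕ)^32 = 4294967296 := by norm_num
      omega
    -- A side
    have hA : gdbLoop 64 n 1 = Int.shiftRight ((2 : Int) ^ (t + 1)) 2 := by
      have := gdbLoop_eq 64 0 t n hn hdvdI hndI (by omega) (by omega)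
      simpa using this
    -- B side
    have hB : Int.land n (-n) = (2 : Int) ^ t := by
      rw [← hcast, land_neg_eq m hmpos]
      have : Nat.ldiff m (m - 1) = 2 ^ t := by
        rw [hfact, hu]
        exact ldiff_pred_eq_pow t u
      rw [this]
      push_cast
      ring
    rw [hA, hB, shift_pow_eq]
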